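-- pv_equiv track=rewrite | github.com/manas-17045/LeetcodeSolutions | Leetcode 3601-3700/3649/3649.py | perfectPairs
-- ===== SOURCE A (Python) =====
-- def perfectPairs(nums: list[int]) -> int:
--     """
--     Calculates the number of "perfect pairs" in a given list of integers.
--     A pair (nums[i], nums[j]) is considered perfect if abs(nums[i]) * 2 >= abs(nums[j])
--     and i < j.
--     :param nums: A list of integers.
--     :return: The total count of perfect pairs.
--     """
--     sortedAbsNums = sorted([abs(x) for x in nums])
--     perfectPairsCount = 0
--     leftIndex = 0
--     arrayLength = len(sortedAbsNums)
--
--     for rightIndex in range(arrayLength):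
--         currentNum = sortedAbsNums[rightIndex]
--         while leftIndex < rightIndex and sortedAbsNums[leftIndex] * 2 < currentNum:
--             leftIndex += 1
--         perfectPairsCount += rightIndex - leftIndex
--
--     return perfectPairsCount
-- ===== SOURCE B (Python) =====
-- def perfectPairs(nums: list[int]) -> int:
--     a = sorted(abs(x) for x in nums)
--     total = 0
--     for j in range(len(a)):
--         x = a[j]
--         # binary search for the leftmost i in [0, j) with a[i] * 2 >= x
--         lo, hi = 0, j
--         while lo < hi:
--             mid = (lo + hi) // 2
--             if a[mid] * 2 < x:
--                 lo = mid + 1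
--             else:
--                 hi = mid
--         total += j - lo
--     return total
-- ===== Notes on version B (the rewrite author's own statement) =====
-- stated objective: alternative
-- what changed: Replaces A's stateful two-pointer sweep (a left index threaded across iterations) with an independent binary search per element over the sorted prefix; the sort is kept.
import Mathlib
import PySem

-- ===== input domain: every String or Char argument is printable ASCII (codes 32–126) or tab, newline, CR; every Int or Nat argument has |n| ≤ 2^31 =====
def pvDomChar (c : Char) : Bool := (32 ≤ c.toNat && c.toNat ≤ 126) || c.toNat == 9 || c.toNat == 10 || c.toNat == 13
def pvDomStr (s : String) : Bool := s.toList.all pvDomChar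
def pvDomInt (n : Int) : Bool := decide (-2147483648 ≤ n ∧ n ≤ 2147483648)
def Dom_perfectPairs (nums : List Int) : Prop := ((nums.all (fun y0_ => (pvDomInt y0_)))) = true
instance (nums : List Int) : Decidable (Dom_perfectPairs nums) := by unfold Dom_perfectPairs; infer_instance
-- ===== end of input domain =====

-- B replaces A's stateful two-pointer sweep with an independent binary search per element (same sort, same return value).


-- ===== PORT A =====
-- the inner while loop; every index accessed is in range, so getD is exact
def pvWhileA (a : List Int) (cur : Int) (right left : Nat) : Nat :=
  if h : left < right ∧ (a.getD left 0) * 2 < cur then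
    pvWhileA a cur right (left + 1)
  else left
termination_by right - left
decreasing_by omega

def perfectPairs (nums : List Int) : Int :=
  let sortedAbsNums := PySem.List.sorted (nums.map (fun x => |x|)) (fun x => x) false
  let arrayLength := sortedAbsNums.length
  let st := (List.range arrayLength).foldl (fun (st : Int × Nat) rightIndex =>
      let currentNum := sortedAbsNums.getD rightIndex 0
      let l := pvWhileA sortedAbsNums currentNum rightIndex st.2
      (st.1 + ((rightIndex : Int) - (l : Int)), l)) (0, 0)
  st.1

-- ===== PORT B =====
-- hand-written leftmost binary search over the prefix [0, j); every index accessed is in range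
def pvBisect (a : List Int) (x : Int) (lo hi : Nat) : Nat :=
  if h : lo < hi then
    let mid := (lo + hi) / 2
    if (a.getD mid 0) * 2 < x then pvBisect a x (mid + 1) hi
    else pvBisect a x lo mid
  else lo
termination_by hi - lo
decreasing_by all_goals omega

def perfectPairs_alt (nums : List Int) : Int :=
  let a := PySem.List.sorted (nums.map (fun x => |x|)) (fun x => x) false
  (List.range a.length).foldl (fun (total : Int) j =>
      let lo := pvBisect a (a.getD j 0) 0 j
      total + ((j : Int) - (lo : Int))) 0

-- ===== PRECONDITION & SPEC =====
def Spec_perfectPairs (nums : List Int) (out : Int) : Prop := out = perfectPairs_alt nums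
instance (nums : List Int) (out : Int) : Decidable (Spec_perfectPairs nums out) := by unfold Spec_perfectPairs; infer_instance

-- ===== CLAIM (what is proved, stated in full; the proofs are below) =====
def Claim_equal_perfectPairs : Prop := ∀ (nums : List Int), Dom_perfectPairs nums → Spec_perfectPairs nums (perfectPairs nums)

-- ===== LEMMAS AND PROOFS =====

-- the number of indices i < j whose doubled value is below x
def pvF (a : List Int) (x : Int) (j : Nat) : Nat :=
  (List.range j).countP (fun i => decide ((a.getD i 0) * 2 < x))

theorem pvGetD_mono (a : List Int) (hs : a.Pairwise (· ≤ ·)) (i j : Nat)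
    (hij : i ≤ j) (hj : j < a.length) : a.getD i 0 ≤ a.getD j 0 := by
  rcases Nat.lt_or_ge i j with h | h
  · rw [List.getD_eq_getElem a 0 (by omega), List.getD_eq_getElem a 0 hj]
    exact (List.pairwise_iff_getElem.mp hs) i j (by omega) hj h
  · have : i = j := by omega
    subst this; exact le_refl _

theorem pvCountP_lt (r j : Nat) (hr : r ≤ j) :
    (List.range j).countP (fun i => decide (i < r)) = r := by
  induction j with
  | zero =>
    have : r = 0 := by omega
    subst this; rfl
  | succ j ih =>
    rcases Nat.lt_or_ge r (j + 1) with h | h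
    · rw [List.range_succ, List.countP_append, ih (by omega)]
      simp [show ¬ j < r by omega]
    · have hrj : r = j + 1 := by omega
      subst hrj
      rw [List.countP_eq_length.mpr (by
        intro i hi
        have := List.mem_range.mp hi
        simp; omega), List.length_range]

-- a stopping index characterizes pvF on a sorted list
theorem pvStopChar (a : List Int) (x : Int) (j r : Nat)
    (hr : r ≤ j)
    (hbad : ∀ i, i < r → (a.getD i 0) * 2 < x)
    (hgood : ∀ i, r ≤ i → i < j → ¬ ((a.getD i 0) * 2 < x)) :
    r = pvF a x j := by
  unfold pvF
  have hcong : ∀ i ∈ List.range j,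
      (decide ((a.getD i 0) * 2 < x)) = (decide (i < r)) := by
    intro i hi
    have hij : i < j := List.mem_range.mp hi
    rcases Nat.lt_or_ge i r with h | h
    · rw [decide_eq_true (hbad i h), decide_eq_true h]
    · rw [decide_eq_false (hgood i h hij), decide_eq_false (by omega)]
  rw [List.countP_congr (fun i hi => by rw [hcong i hi]), pvCountP_lt r j hr]

-- A's while loop lands on the stopping index
theorem pvWhileA_spec (a : List Int) (x : Int) (j : Nat) :
    ∀ l, l ≤ j → (∀ i, i < l → (a.getD i 0) * 2 < x) →
      pvWhileA a x j l ≤ j ∧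
      (∀ i, i < pvWhileA a x j l → (a.getD i 0) * 2 < x) ∧
      (pvWhileA a x j l = j ∨ ¬ ((a.getD (pvWhileA a x j l) 0) * 2 < x)) := by
  intro l
  induction l using pvWhileA.induct a x j with
  | case1 l h ih =>
    intro hl hbad
    rw [pvWhileA, dif_pos h]
    exact ih (by omega) (by
      intro i hi
      rcases Nat.lt_or_ge i l with h' | h'
      · exact hbad i h'
      · have : i = l := by omega
        subst this; exact h.2)
  | case2 l h =>
    intro hl hbad
    rw [pvWhileA, dif_neg h]
    refine ⟨hl, hbad, ?_⟩
    by_cases hlj : l = j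
    · exact Or.inl hlj
    · exact Or.inr (fun hb => h ⟨by omega, hb⟩)

-- B's binary search lands on the stopping index
theorem pvBisect_spec (a : List Int) (hs : a.Pairwise (· ≤ ·)) (x : Int) (j : Nat)
    (hj : j ≤ a.length) :
    ∀ lo hi, lo ≤ hi → hi ≤ j →
      (∀ i, i < lo → (a.getD i 0) * 2 < x) →
      (∀ i, hi ≤ i → i < j → ¬ ((a.getD i 0) * 2 < x)) →
      pvBisect a x lo hi ≤ j ∧
      (∀ i, i < pvBisect a x lo hi → (a.getD i 0) * 2 < x) ∧
      (∀ i, pvBisect a x lo hi ≤ i → i < j → ¬ ((a.getD i 0) * 2 < x)) := by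
  intro lo hi
  induction lo, hi using pvBisect.induct a x with
  | case1 lo hi h mid hmid ih =>
    intro hlohi hhij hbad hgood
    have hmideq : mid = (lo + hi) / 2 := rfl
    rw [pvBisect, dif_pos h]
    simp only []
    rw [if_pos (show a.getD ((lo + hi) / 2) 0 * 2 < x from hmid)]
    refine ih (by omega) hhij ?_ hgood
    intro i hi'
    have h1 : a.getD i 0 ≤ a.getD mid 0 :=
      pvGetD_mono a hs i mid (by omega) (by omega)
    omega
  | case2 lo hi h mid hmid ih =>
    intro hlohi hhij hbad hgood
    have hmideq : mid = (lo + hi) / 2 := rfl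
    rw [pvBisect, dif_pos h]
    simp only []
    rw [if_neg (show ¬ a.getD ((lo + hi) / 2) 0 * 2 < x from hmid)]
    refine ih (by omega) (by omega) hbad ?_
    intro i hi1 hi2
    have h1 : a.getD mid 0 ≤ a.getD i 0 :=
      pvGetD_mono a hs mid i (by omega) (by omega)
    omega
  | case3 lo hi h =>
    intro hlohi hhij hbad hgood
    rw [pvBisect, dif_neg h]
    exact ⟨by omega, hbad, fun i hi1 hi2 => hgood i (by omega) hi2⟩

-- the joint loop invariant: A's running pair equals (B's running total, the stopping index of the previous step)
theorem pvMain (a : List Int) (hs : a.Pairwise (· ≤ ·)) :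
    ∀ m, m ≤ a.length →
    ∃ c l, ((List.range m).foldl (fun (st : Int × Nat) rightIndex =>
        let currentNum := a.getD rightIndex 0
        let l := pvWhileA a currentNum rightIndex st.2
        (st.1 + ((rightIndex : Int) - (l : Int)), l)) (0, 0)) = (c, l)
      ∧ c = (List.range m).foldl (fun (total : Int) j =>
        let lo := pvBisect a (a.getD j 0) 0 j
        total + ((j : Int) - (lo : Int))) 0
      ∧ l ≤ m ∧ (∀ i, i < l → (a.getD i 0) * 2 < a.getD (m - 1) 0) := by
  intro m
  induction m with
  | zero =>
    intro _
    exact ⟨0, 0, rfl, rfl, le_refl _, by omega⟩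
  | succ m ih =>
    intro hm
    obtain ⟨c, l, heq, hc, hl, hbad⟩ := ih (by omega)
    -- lift the invariant to the new pivot a[m]
    have hbad' : ∀ i, i < l → (a.getD i 0) * 2 < a.getD m 0 := by
      intro i hi
      have h1 := hbad i hi
      have h2 : a.getD (m - 1) 0 ≤ a.getD m 0 :=
        pvGetD_mono a hs (m - 1) m (by omega) (by omega)
      omega
    have hw := pvWhileA_spec a (a.getD m 0) m l hl hbad'
    set r := pvWhileA a (a.getD m 0) m l with hr
    have hgoodr : ∀ i, r ≤ i → i < m → ¬ ((a.getD i 0) * 2 < a.getD m 0) := by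
      intro i hi1 hi2
      rcases hw.2.2 with h | h
      · omega
      · have h1 : a.getD r 0 ≤ a.getD i 0 :=
          pvGetD_mono a hs r i hi1 (by omega)
        omega
    have hrF : r = pvF a (a.getD m 0) m := pvStopChar a _ m r hw.1 hw.2.1 hgoodr
    have hb := pvBisect_spec a hs (a.getD m 0) m (by omega) 0 m (by omega) (le_refl _)
      (by omega) (by omega)
    have hbF : pvBisect a (a.getD m 0) 0 m = pvF a (a.getD m 0) m :=
      pvStopChar a _ m _ hb.1 hb.2.1 hb.2.2
    refine ⟨c + ((m : Int) - (r : Int)), r, ?_, ?_, by omega, ?_⟩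
    · rw [List.range_succ, List.foldl_append, heq]
      rfl
    · rw [List.range_succ, List.foldl_append, ← hc]
      simp only [List.foldl_cons, List.foldl_nil]
      rw [hbF, ← hrF]
    · intro i hi
      exact hw.2.1 i hi

-- ===== VERDICT (by name: the statement is the Claim_ definition above) =====
theorem perfectPairs_spec : Claim_equal_perfectPairs := by
  intro nums _
  unfold Spec_perfectPairs perfectPairs perfectPairs_alt
  have hs : (PySem.List.sorted (nums.map (fun x => |x|)) (fun x => x) false).Pairwise (· ≤ ·) :=
    PySem.List.sorted_pairwise (nums.map (fun x => |x|)) (fun x => x)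
  obtain ⟨c, l, heq, hc, _, _⟩ :=
    pvMain (PySem.List.sorted (nums.map (fun x => |x|)) (fun x => x) false) hs
      (PySem.List.sorted (nums.map (fun x => |x|)) (fun x => x) false).length (le_refl _)
  simp only [heq, hc]
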